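-- pv_equiv track=rewrite | github.com/jorippppong/Daily_Challenge | Programmers/Lv_3/python/숫자_게임.py | solution
-- ===== SOURCE A (Python) =====
-- def solution(A, B):
--     A.sort(reverse = True)
--     B.sort(reverse = True)
--     a, b, score = 0, 0, 0
--     length = len(A)
--     for _ in range(length):
--         if a==length:
--             return
--         if B[b] > A[a]:
--             score += 1
--             b+=1
--         a+=1
--     return score
-- ===== SOURCE B (Python) =====
-- def solution(A, B):
--     A.sort(reverse=True)
--     B.sort(reverse=True)
--     i = len(A) - 1
--     score = 0
--     for b in reversed(B):
--         if i >= 0 and b > A[i]: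
--             i -= 1
--             score += 1
--     return score
-- ===== Notes on version B (the rewrite author's own statement) =====
-- stated objective: alternative
-- what changed: Replaces A's index-juggling descending two-pointer (unconditional A-pointer advance, manual b index, dead early-return branch) by the mirror ascending scan: iterate B's values smallest-to-largest and conditionally consume the smallest unbeaten A element; equality of the two greedies is the proved theorem.
-- outside the precondition, e.g. on solution([3, 1], [2]): A returns 1, B returns 1; on solution([0], []): A raises IndexError, B returns 0
import Mathlib
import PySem

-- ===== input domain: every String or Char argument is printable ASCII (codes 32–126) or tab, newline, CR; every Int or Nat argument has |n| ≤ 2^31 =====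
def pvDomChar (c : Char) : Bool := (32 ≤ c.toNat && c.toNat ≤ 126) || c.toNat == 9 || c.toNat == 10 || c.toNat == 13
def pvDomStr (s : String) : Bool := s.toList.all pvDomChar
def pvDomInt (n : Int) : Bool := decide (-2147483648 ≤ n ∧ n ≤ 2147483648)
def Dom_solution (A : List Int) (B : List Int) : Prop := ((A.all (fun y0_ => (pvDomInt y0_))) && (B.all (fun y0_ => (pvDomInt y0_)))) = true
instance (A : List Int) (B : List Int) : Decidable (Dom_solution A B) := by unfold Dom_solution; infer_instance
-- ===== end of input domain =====

-- B replaces A's descending two-pointer with the mirror ascending scan over B (alternative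
-- decomposition, same cost); both Pythons sort A and B in place (same side effect), the
-- equivalence proved is about the return value on inputs with len(A) ≤ len(B).


-- ===== PORT A =====
-- the loop `for _ in range(length)` with state (a, b, score); the `if a==length: return`
-- branch is Python's dead `return None` (a < length always holds there), ported as 0
def solGoA (As Bs : List Int) (len : Nat) : Nat → Nat → Nat → Int → Int
  | 0, _, _, score => score
  | n+1, a, b, score =>
    if a = len then 0   -- dead branch: Python's bare `return` (unreachable)
    else if ((PySem.List.pyGet? Bs (b : Int)).getD 0) > ((PySem.List.pyGet? As (a : Int)).getD 0) then
      solGoA As Bs len n (a+1) (b+1) (score+1)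
    else
      solGoA As Bs len n (a+1) b score

def solution (A : List Int) (B : List Int) : Int :=
  let As := PySem.List.sorted A (fun x => x) true
  let Bs := PySem.List.sorted B (fun x => x) true
  let length := As.length
  solGoA As Bs length length 0 0 0

-- ===== PORT B =====
-- fold over reversed(B) with state (i, score): i points at the smallest unbeaten A element
def solution_alt (A : List Int) (B : List Int) : Int :=
  let As := PySem.List.sorted A (fun x => x) true
  let Bs := PySem.List.sorted B (fun x => x) true
  let st := Bs.reverse.foldl
    (fun (st : Int × Int) bv =>
      if st.1 ≥ 0 ∧ bv > ((PySem.List.pyGet? As st.1).getD 0) then (st.1 - 1, st.2 + 1)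
      else st)
    ((As.length : Int) - 1, 0)
  st.2

-- ===== PRECONDITION & SPEC =====
-- Pre_ requires len(A) ≤ len(B), the problem's guaranteed shape: when B is shorter, A's
-- greedy usually reads past B's end and raises IndexError (on the remaining short-B inputs
-- A's return is accidental; B returns the same value there anyway).
def Pre_solution (A : List Int) (B : List Int) : Prop := A.length ≤ B.length
instance (A : List Int) (B : List Int) : Decidable (Pre_solution A B) := by unfold Pre_solution; infer_instance
def pvWitness_solution : List Int × List Int := ([5, 1, 3], [6, 2, 2])
def Spec_solution (A : List Int) (B : List Int) (out : Int) : Prop := out = solution_alt A B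
instance (A : List Int) (B : List Int) (out : Int) : Decidable (Spec_solution A B out) := by unfold Spec_solution; infer_instance

-- ===== CLAIM (what is proved, stated in full; the proofs are below) =====
def Claim_equal_solution : Prop := ∀ (A : List Int) (B : List Int), Dom_solution A B → Pre_solution A B → Spec_solution A B (solution A B)

-- ===== LEMMAS AND PROOFS =====

-- Pure form of A's greedy: lists in descending order, consume A's head each step,
-- B's head on a win.
def dGreedy : List Int → List Int → Int
  | [], _ => 0
  | _ :: _, [] => 0
  | a :: as, b :: bs => if b > a then 1 + dGreedy as bs else dGreedy as (b :: bs)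

-- Pure form of B's greedy: lists in ascending order, scan B; a win consumes A's head.
def uGreedy : List Int → List Int → Int
  | _, [] => 0
  | [], _ :: bs => uGreedy [] bs
  | a :: as, b :: bs => if b > a then 1 + uGreedy as bs else uGreedy (a :: as) bs

theorem uGreedy_nil (Q : List Int) : uGreedy [] Q = 0 := by
  induction Q with
  | nil => rfl
  | cons q qs ih => simpa [uGreedy] using ih

-- (ii') dropping an unbeatable largest A element does not change the count
theorem uGreedy_append_unbeaten (a : Int) (P Q : List Int)
    (hq : ∀ q ∈ Q, ¬ q > a) : uGreedy (P ++ [a]) Q = uGreedy P Q := by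
  induction Q generalizing P with
  | nil => simp [uGreedy]
  | cons q qs ih =>
    have hqa : ¬ q > a := hq q (by simp)
    have hqs : ∀ r ∈ qs, ¬ r > a := fun r hr => hq r (by simp [hr])
    cases P with
    | nil =>
      simp only [List.nil_append, uGreedy, if_neg hqa]
      rw [show uGreedy [a] qs = uGreedy ([] ++ [a]) qs from rfl, ih [] hqs]
    | cons x xs =>
      simp only [List.cons_append, uGreedy]
      by_cases hqx : q > x
      · simp only [if_pos hqx, ih xs hqs]
      · simp only [if_neg hqx]
        exact ih (x :: xs) hqs

-- (i) a final B element beating a largest A element contributes exactly one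
theorem uGreedy_append_win (a b : Int) (P Q : List Int)
    (hP : ∀ x ∈ P, x ≤ a) (hb : b > a) :
    uGreedy (P ++ [a]) (Q ++ [b]) = 1 + uGreedy P Q := by
  induction Q generalizing P with
  | nil =>
    cases P with
    | nil => simp [uGreedy, hb]
    | cons x xs =>
      have hxb : b > x := lt_of_le_of_lt (hP x (by simp)) hb
      simp [uGreedy, hxb]
  | cons q qs ih =>
    cases P with
    | nil =>
      simp only [List.nil_append, List.cons_append, uGreedy]
      by_cases hqa : q > a
      · simp only [if_pos hqa]
        simp [uGreedy_nil]
      · simp only [if_neg hqa]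
        rw [show uGreedy [a] (qs ++ [b]) = uGreedy ([] ++ [a]) (qs ++ [b]) from rfl,
            ih [] (by simp)]
    | cons x xs =>
      simp only [List.cons_append, uGreedy]
      by_cases hqx : q > x
      · simp only [if_pos hqx, ih xs (fun r hr => hP r (by simp [hr]))]
      · simp only [if_neg hqx]
        exact ih (x :: xs) hP

-- main combinatorial theorem: on descending lists the two greedies agree
theorem dGreedy_eq_uGreedy (L M : List Int)
    (hL : L.Pairwise (fun x y => y ≤ x)) (hM : M.Pairwise (fun x y => y ≤ x)) :
    dGreedy L M = uGreedy L.reverse M.reverse := by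
  induction L generalizing M with
  | nil => simp [dGreedy, uGreedy_nil]
  | cons a as ih =>
    cases M with
    | nil => simp [dGreedy, uGreedy]
    | cons b bs =>
      have hL' := (List.pairwise_cons.mp hL).2
      have hLa := (List.pairwise_cons.mp hL).1
      have hM' := (List.pairwise_cons.mp hM).2
      have hMb := (List.pairwise_cons.mp hM).1
      simp only [dGreedy, List.reverse_cons]
      by_cases hba : b > a
      · rw [if_pos hba,
            uGreedy_append_win a b as.reverse bs.reverse
              (fun x hx => hLa x (List.mem_reverse.mp hx)) hba,
            ih bs hL' hM']
      · rw [if_neg hba]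
        have hq : ∀ q ∈ bs.reverse ++ [b], ¬ q > a := by
          intro q hq'
          rcases List.mem_append.mp hq' with h | h
          · have := hMb q (List.mem_reverse.mp h)
            exact not_lt.mpr (le_trans this (not_lt.mp hba))
          · simp at h; subst h; exact hba
        rw [uGreedy_append_unbeaten a as.reverse _ hq, ih (b :: bs) hL' hM,
            List.reverse_cons]

-- pyGet? at an in-range natural index is getElem
theorem pyGet_nat (xs : List Int) (i : Nat) (h : i < xs.length) :
    (PySem.List.pyGet? xs (i : Int)).getD 0 = xs[i] := by
  simp [PySem.List.pyGet?, PySem.List.pyIdx?, h]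

-- bridge for port A: solGoA computes dGreedy on the remaining suffixes
theorem solGoA_eq_dGreedy (As Bs : List Int) (n a b : Nat) (score : Int)
    (hn : n = As.length - a) (hab : b ≤ a) (haA : a ≤ As.length)
    (hAB : As.length ≤ Bs.length) :
    solGoA As Bs As.length n a b score
      = score + dGreedy (As.drop a) (Bs.drop b) := by
  induction n generalizing a b score with
  | zero =>
    have ha : a = As.length := by omega
    subst ha
    simp [solGoA, dGreedy, List.drop_length]
  | succ n ih =>
    have ha : a < As.length := by omega
    have hb : b < Bs.length := by omega
    rw [List.drop_eq_getElem_cons ha, List.drop_eq_getElem_cons hb]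
    simp only [solGoA, if_neg (by omega : ¬ a = As.length),
      pyGet_nat As a ha, pyGet_nat Bs b hb, dGreedy]
    by_cases hw : Bs[b] > As[a]
    · rw [if_pos hw, if_pos hw, ih (a + 1) (b + 1) (score + 1) (by omega) (by omega) (by omega)]
      ring
    · rw [if_neg hw, if_neg hw, ih (a + 1) b score (by omega) (by omega) (by omega),
          List.drop_eq_getElem_cons hb]

-- bridge for port B: the fold computes uGreedy on the reversed taken prefix
theorem foldB_eq_uGreedy (As : List Int) (Q : List Int) (k : Nat) (score : Int)
    (hk : k ≤ As.length) :
    (Q.foldl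
      (fun (st : Int × Int) bv =>
        if st.1 ≥ 0 ∧ bv > ((PySem.List.pyGet? As st.1).getD 0) then (st.1 - 1, st.2 + 1)
        else st)
      ((k : Int) - 1, score)).2
      = score + uGreedy ((As.take k).reverse) Q := by
  induction Q generalizing k score with
  | nil => simp [uGreedy]
  | cons q qs ih =>
    cases k with
    | zero =>
      simp only [List.foldl_cons]
      rw [if_neg (by simp)]
      rw [ih 0 score (by omega)]
      simp [uGreedy_nil]
    | succ j =>
      have hj : j < As.length := by omega
      have htake : (As.take (j + 1)).reverse = As[j] :: (As.take j).reverse := by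
        rw [List.take_add_one, List.getElem?_eq_getElem hj]
        simp
      have hcast : ((j + 1 : Nat) : Int) - 1 = (j : Int) := by push_cast; ring
      simp only [List.foldl_cons, hcast, pyGet_nat As j hj, htake, uGreedy]
      by_cases hw : q > As[j]
      · rw [if_pos ⟨by omega, hw⟩, if_pos hw]
        rw [ih j (score + 1) (by omega)]
        ring
      · rw [if_neg (by simp [hw]), if_neg hw]
        have := ih (j + 1) score (by omega)
        rw [hcast, htake] at this
        exact this

-- sorted-descending lists are pairwise ≥
theorem sorted_rev_pairwise_ge (xs : List Int) :
    (PySem.List.sorted xs (fun x => x) true).Pairwise (fun x y => y ≤ x) :=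
  PySem.List.sorted_pairwise_rev xs (fun x => x)

-- ===== VERDICT (by name: the statement is the Claim_ definition above) =====
theorem solution_spec : Claim_equal_solution := by
  intro A B _ hpre
  unfold Spec_solution solution solution_alt
  simp only []
  set As := PySem.List.sorted A (fun x => x) true with hAs
  set Bs := PySem.List.sorted B (fun x => x) true with hBs
  have hlen : As.length ≤ Bs.length := by
    rw [hAs, hBs, PySem.List.length_sorted, PySem.List.length_sorted]
    exact hpre
  have h1 : solGoA As Bs As.length As.length 0 0 0
      = dGreedy As Bs := by
    have := solGoA_eq_dGreedy As Bs As.length 0 0 0 (by omega) (by omega) (by omega) hlen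
    simpa using this
  have h2 := foldB_eq_uGreedy As Bs.reverse As.length 0 (le_refl _)
  rw [List.take_length] at h2
  rw [h1, h2, dGreedy_eq_uGreedy As Bs (sorted_rev_pairwise_ge A) (sorted_rev_pairwise_ge B)]
  simp
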